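-- pv_equiv track=rewrite | github.com/chfenja/CS50 | cs50p/week-2/plates.py | num_at_end
-- ===== SOURCE A (Python) =====
-- def num_at_end(plate):
--     found_number = False
--     for c in plate:
--         if c.isdigit():
--             if c == "0" and not found_number:
--                 return False
--             found_number = True
--         if c.isalpha() and found_number:
--             return False
--     return True
-- ===== SOURCE B (Python) =====
-- def num_at_end(plate):
--     n = len(plate)
--     clash = any(
--         plate[i].isdigit() and plate[j].isalpha()
--         for i in range(n)
--         for j in range(n)
--         if i < j
--     )
--     if clash:
--         return False
--     digits = [c for c in plate if c.isdigit()]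
--     return not (digits and digits[0] == "0")
-- ===== Notes on version B (the rewrite author's own statement) =====
-- stated objective: alternative
-- what changed: Replaces A's stateful one-pass flag loop with a stateless brute-force check over all index pairs i<j for a digit-then-letter violation, plus a filter of all digits to test the leading zero; B trades A's O(n) single pass for a quadratic pair search.
import Mathlib
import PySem

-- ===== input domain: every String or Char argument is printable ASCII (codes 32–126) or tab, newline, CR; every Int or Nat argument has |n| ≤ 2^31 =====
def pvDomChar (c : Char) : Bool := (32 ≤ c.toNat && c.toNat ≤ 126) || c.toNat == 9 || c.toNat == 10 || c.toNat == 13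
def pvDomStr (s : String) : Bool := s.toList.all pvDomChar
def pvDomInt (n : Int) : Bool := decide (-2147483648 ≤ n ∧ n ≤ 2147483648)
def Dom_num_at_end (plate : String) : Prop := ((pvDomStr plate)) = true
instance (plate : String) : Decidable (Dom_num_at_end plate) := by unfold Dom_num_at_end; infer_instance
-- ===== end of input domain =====

-- B replaces A's stateful one-pass flag loop by a stateless brute-force check over all index
-- pairs i < j (digit-then-letter violation) plus a filter of the digits for the leading-zero
-- test; objective: alternative (B is quadratic, A linear).

-- ===== PORT A =====
-- A's loop: for c in plate, carrying the found_number flag.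
def numAtEndLoopA : List Char → Bool → Bool
  | [], _ => true
  | c :: cs, found =>
    if PySem.Chars.isdigit c then
      if c == '0' && !found then false
      else if PySem.Chars.isalpha c && true then false
      else numAtEndLoopA cs true
    else if PySem.Chars.isalpha c && found then false
    else numAtEndLoopA cs found

def num_at_end (plate : String) : Bool := numAtEndLoopA plate.toList false

-- ===== PORT B =====
-- B: clash = any(plate[i].isdigit() and plate[j].isalpha() for i in range(n) for j in range(n) if i < j);
-- then digits = [c for c in plate if c.isdigit()]; return not (digits and digits[0] == "0").
def num_at_end_alt (plate : String) : Bool :=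
  let cs := plate.toList
  let n := cs.length
  let clash := (List.range n).any (fun i =>
    (List.range n).any (fun j =>
      decide (i < j) && (PySem.Chars.isdigit (cs.getD i ' ') && PySem.Chars.isalpha (cs.getD j ' '))))
  if clash then false
  else
    let digits := cs.filter PySem.Chars.isdigit
    !(!digits.isEmpty && (digits.headD ' ' == '0'))

-- ===== PRECONDITION & SPEC =====
def Spec_num_at_end (plate : String) (out : Bool) : Prop := out = num_at_end_alt plate
instance (plate : String) (out : Bool) : Decidable (Spec_num_at_end plate out) := by unfold Spec_num_at_end; infer_instance

-- ===== CLAIM (what is proved, stated in full; the proofs are below) =====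
def Claim_equal_num_at_end : Prop := ∀ (plate : String), Dom_num_at_end plate → Spec_num_at_end plate (num_at_end plate)

-- ===== LEMMAS AND PROOFS =====

theorem digit_not_alpha (c : Char) (h : PySem.Chars.isdigit c = true) :
    PySem.Chars.isalpha c = false := by
  simp only [PySem.Chars.isdigit, PySem.Chars.isalpha, PySem.Chars.isupper, PySem.Chars.islower,
    Bool.and_eq_true, Bool.or_eq_false_iff, Bool.and_eq_false_iff,
    decide_eq_true_eq, decide_eq_false_iff_not, Char.le_def, UInt32.le_iff_toNat_le] at *
  have h0 : ('0' : Char).val.toNat = 48 := rfl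
  have h9 : ('9' : Char).val.toNat = 57 := rfl
  have hA : ('A' : Char).val.toNat = 65 := rfl
  have hZ : ('Z' : Char).val.toNat = 90 := rfl
  have ha : ('a' : Char).val.toNat = 97 := rfl
  have hz : ('z' : Char).val.toNat = 122 := rfl
  omega

theorem loopA_true (l : List Char) : numAtEndLoopA l true = !(l.any PySem.Chars.isalpha) := by
  induction l with
  | nil => rfl
  | cons c cs ih =>
    simp only [numAtEndLoopA, List.any_cons]
    by_cases hd : PySem.Chars.isdigit c = true
    · simp [hd, digit_not_alpha c hd, ih]
    · by_cases ha : PySem.Chars.isalpha c = true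
      · simp [hd, ha]
      · simp [hd, eq_false_of_ne_true ha, ih]

theorem loopA_false (l : List Char) :
    numAtEndLoopA l false =
      (match l.findIdx? PySem.Chars.isdigit with
       | none => true
       | some i => if l.getD i ' ' == '0' then false
                   else !((l.drop (i + 1)).any PySem.Chars.isalpha)) := by
  induction l with
  | nil => rfl
  | cons c cs ih =>
    by_cases hd : PySem.Chars.isdigit c = true
    · simp only [numAtEndLoopA, hd, if_true, List.findIdx?_cons, Bool.not_false, Bool.and_true,
        digit_not_alpha c hd, Bool.false_and]
      by_cases h0 : c = '0'
      · simp [h0]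
      · simp [h0, loopA_true, beq_iff_eq]
    · have hd' := eq_false_of_ne_true hd
      simp only [numAtEndLoopA, hd', Bool.and_false, if_false, Bool.false_eq_true,
        List.findIdx?_cons, ih]
      cases h : cs.findIdx? PySem.Chars.isdigit with
      | none => simp
      | some i => simp [List.getD]

-- the clash expression of B, as a standalone function for the lemmas below
def clashB (cs : List Char) : Bool :=
  (List.range cs.length).any (fun i =>
    (List.range cs.length).any (fun j =>
      decide (i < j) && (PySem.Chars.isdigit (cs.getD i ' ') && PySem.Chars.isalpha (cs.getD j ' '))))

theorem clashB_eq_true_iff (cs : List Char) :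
    clashB cs = true ↔ ∃ i j, i < j ∧ j < cs.length ∧
      PySem.Chars.isdigit (cs.getD i ' ') = true ∧ PySem.Chars.isalpha (cs.getD j ' ') = true := by
  simp only [clashB, List.any_eq_true, List.mem_range, Bool.and_eq_true, decide_eq_true_eq]
  constructor
  · rintro ⟨i, hi, j, hj, hij, hd, ha⟩
    exact ⟨i, j, hij, hj, hd, ha⟩
  · rintro ⟨i, j, hij, hj, hd, ha⟩
    exact ⟨i, by omega, j, hj, hij, hd, ha⟩

-- the first element the filter keeps is the element at the findIdx? position
theorem filter_head_of_findIdx? (p : Char → Bool) :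
    ∀ (cs : List Char) (i : ℕ), cs.findIdx? p = some i →
      i < cs.length ∧ p (cs.getD i ' ') = true ∧
      (cs.filter p).head? = some (cs.getD i ' ') ∧
      (∀ k, k < i → p (cs.getD k ' ') = false) := by
  intro cs
  induction cs with
  | nil => intro i h; simp [List.findIdx?_nil] at h
  | cons c cs ih =>
    intro i h
    rw [List.findIdx?_cons] at h
    by_cases hc : p c = true
    · simp only [hc, if_true, Option.some.injEq] at h
      subst h
      refine ⟨by simp, by simpa using hc, by simp [hc], by omega⟩
    · have hc' := eq_false_of_ne_true hc
      rw [hc'] at h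
      simp only [Bool.false_eq_true, if_false] at h
      cases hrec : cs.findIdx? p with
      | none => rw [hrec] at h; simp at h
      | some i' =>
      rw [hrec] at h
      simp only [Option.map_some, Option.some.injEq] at h
      subst h
      have hi' := hrec
      obtain ⟨h1, h2, h3, h4⟩ := ih i' hi'
      refine ⟨by simpa using Nat.succ_lt_succ h1, by simpa using h2,
        by simpa [List.filter_cons, hc'] using h3, ?_⟩
      intro k hk
      cases k with
      | zero => simpa using hc'
      | succ k => simpa using h4 k (by omega)

theorem findIdx?_none_clash (cs : List Char)
    (h : cs.findIdx? PySem.Chars.isdigit = none) : clashB cs = false := by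
  have hall : ∀ x ∈ cs, ¬ PySem.Chars.isdigit x = true := by
    simpa [List.findIdx?_eq_none_iff] using h
  by_contra hcl
  have := (clashB_eq_true_iff cs).1 (by
    cases hc : clashB cs with
    | true => rfl
    | false => exact absurd hc hcl)
  obtain ⟨i, j, hij, hj, hd, _⟩ := this
  have hi : i < cs.length := by omega
  rw [List.getD_eq_getElem cs ' ' hi] at hd
  exact hall _ (cs.getElem_mem hi) hd

theorem findIdx?_some_clash (cs : List Char) (i : ℕ)
    (h : cs.findIdx? PySem.Chars.isdigit = some i) :
    clashB cs = (cs.drop (i + 1)).any PySem.Chars.isalpha := by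
  obtain ⟨hi, hd, _, hmin⟩ := filter_head_of_findIdx? PySem.Chars.isdigit cs i h
  cases ha : (cs.drop (i + 1)).any PySem.Chars.isalpha with
  | true =>
    simp only [List.any_eq_true] at ha
    obtain ⟨a, hmem, hal⟩ := ha
    obtain ⟨k, hk, rfl⟩ := List.mem_iff_getElem.1 hmem
    have hk' : i + 1 + k < cs.length := by
      rw [List.length_drop] at hk; omega
    rw [List.getElem_drop] at hal
    apply (clashB_eq_true_iff cs).2
    exact ⟨i, i + 1 + k, by omega, hk',
      hd, by rwa [List.getD_eq_getElem cs ' ' hk']⟩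
  | false =>
    by_contra hcl
    obtain ⟨p, q, hpq, hq, hdp, hap⟩ := (clashB_eq_true_iff cs).1 (by
      cases hc : clashB cs with
      | true => rfl
      | false => exact absurd hc hcl)
    by_cases hqi : q ≤ i
    · rw [hmin p (by omega)] at hdp; exact Bool.false_ne_true hdp
    · have hq' : i + 1 + (q - (i + 1)) < cs.length := by omega
      have hjlt : q - (i + 1) < (cs.drop (i + 1)).length := by
        rw [List.length_drop]; omega
      have hdropEl : (cs.drop (i + 1))[q - (i + 1)]'hjlt = cs[q]'hq := by
        rw [List.getElem_drop]; congr 1; omega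
      have hmem : cs[q]'hq ∈ cs.drop (i + 1) := hdropEl ▸ List.getElem_mem hjlt
      have halq : PySem.Chars.isalpha (cs[q]'hq) = true := by
        rwa [List.getD_eq_getElem cs ' ' hq] at hap
      simp only [List.any_eq_false] at ha
      exact absurd halq (ha _ hmem)

theorem B_eq_findIdxForm (cs : List Char) :
    (if clashB cs then false
     else !(!(cs.filter PySem.Chars.isdigit).isEmpty &&
            ((cs.filter PySem.Chars.isdigit).headD ' ' == '0'))) =
      (match cs.findIdx? PySem.Chars.isdigit with
       | none => true
       | some i => if cs.getD i ' ' == '0' then false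
                   else !((cs.drop (i + 1)).any PySem.Chars.isalpha)) := by
  cases h : cs.findIdx? PySem.Chars.isdigit with
  | none =>
    have hfil : cs.filter PySem.Chars.isdigit = [] := by
      simp only [List.filter_eq_nil_iff]
      simpa [List.findIdx?_eq_none_iff] using h
    rw [findIdx?_none_clash cs h, hfil]
    simp
  | some i =>
    obtain ⟨hi, hd, hhead, _⟩ := filter_head_of_findIdx? PySem.Chars.isdigit cs i h
    have hne : (cs.filter PySem.Chars.isdigit).isEmpty = false := by
      cases hf : cs.filter PySem.Chars.isdigit with
      | nil => rw [hf] at hhead; simp at hhead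
      | cons a l => simp
    have hhd : (cs.filter PySem.Chars.isdigit).headD ' ' = cs.getD i ' ' := by
      cases hf : cs.filter PySem.Chars.isdigit with
      | nil => rw [hf] at hhead; simp at hhead
      | cons a l => rw [hf] at hhead; simp at hhead; simp [hhead]
    rw [findIdx?_some_clash cs i h, hhd]
    cases ha : (cs.drop (i + 1)).any PySem.Chars.isalpha <;>
      by_cases h0 : cs.getD i ' ' = '0' <;>
        simp [ha, hne, h0, beq_eq_decide]

-- ===== VERDICT (by name: the statement is the Claim_ definition above) =====
theorem num_at_end_spec : Claim_equal_num_at_end := by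
  intro plate _
  show numAtEndLoopA plate.toList false = _
  exact (loopA_false plate.toList).trans (B_eq_findIdxForm plate.toList).symm
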